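-- pv_equiv track=rewrite | github.com/sauraen/ci4tool | ci4tool.py | indexes_to_c
-- ===== SOURCE A (Python) =====
-- def indexes_to_c(d, array_name=None, comment=None):
--     '''
--     Writes a C array containing the indexes for a color-indexed image as
--     returned by apply_palette_to_im / apply_palette_to_png. Optionally writes
--     the array definition (rather than just the contents) if the array name is
--     given, and an optional comment (e.g. for the input filename).
--     '''
--     assert (len(d) & 15) == 0
--     ret = ''
--     if array_name is not None:
--         ret += '__attribute__((aligned(16))) u64 ' + array_name + '[] = {\n'
--     if comment is not None:
--         ret += '    // ' + comment + '\n'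
--     i = 0
--     while i < len(d):
--         ret += '    '
--         for _ in range(4):
--             ret += '0x'
--             for _ in range(16):
--                 ret += format(d[i], 'x')
--                 i += 1
--             ret += ', '
--             if i >= len(d): break
--         ret += '\n'
--     if array_name is not None:
--         ret += '};\n'
--     return ret
-- ===== SOURCE B (Python) =====
-- def indexes_to_c(d, array_name=None, comment=None):
--     '''
--     Writes a C array containing the indexes for a color-indexed image as
--     returned by apply_palette_to_im / apply_palette_to_png.
--     '''
--     assert (len(d) & 15) == 0
--     words = ['0x' + ''.join(format(x, 'x') for x in d[k:k+16])
--              for k in range(0, len(d), 16)]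
--     lines = ['    ' + ''.join(w + ', ' for w in words[j:j+4]) + '\n'
--              for j in range(0, len(words), 4)]
--     pieces = []
--     if array_name is not None:
--         pieces.append('__attribute__((aligned(16))) u64 ' + array_name + '[] = {\n')
--     if comment is not None:
--         pieces.append('    // ' + comment + '\n')
--     pieces.extend(lines)
--     if array_name is not None:
--         pieces.append('};\n')
--     return ''.join(pieces)
-- ===== Notes on version B (the rewrite author's own statement) =====
-- stated objective: alternative
-- what changed: Replaces A's index-chasing while loop with nested counted for-loops and a mid-loop break by first building the flat list of u64 word strings from 16-element slices and then reshaping it into 4-word lines that are joined with the header/comment/footer pieces.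
import Mathlib
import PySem

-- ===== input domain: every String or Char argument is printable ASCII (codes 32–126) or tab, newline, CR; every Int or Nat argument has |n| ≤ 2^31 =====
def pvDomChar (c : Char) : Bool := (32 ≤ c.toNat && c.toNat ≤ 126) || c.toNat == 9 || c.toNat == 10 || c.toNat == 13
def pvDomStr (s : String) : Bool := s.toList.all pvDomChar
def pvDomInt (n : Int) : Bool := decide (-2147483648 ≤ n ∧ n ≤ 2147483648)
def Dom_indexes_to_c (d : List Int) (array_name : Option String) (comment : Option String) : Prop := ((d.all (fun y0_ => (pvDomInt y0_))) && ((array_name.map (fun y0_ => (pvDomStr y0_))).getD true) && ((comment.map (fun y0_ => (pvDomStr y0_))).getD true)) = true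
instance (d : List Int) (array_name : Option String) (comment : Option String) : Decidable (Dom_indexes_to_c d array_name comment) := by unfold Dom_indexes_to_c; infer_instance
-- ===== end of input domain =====

-- B restructures A's nested index-chasing while/for loops into a words-list built from
-- 16-element slices, reshaped into lines of 4 words (objective: alternative decomposition,
-- same cost); A = B is proved on every d whose length is a multiple of 16 (A's assert).

-- ===== PORT A =====

-- shared port of Python's format(n, 'x'): lowercase hex digits, '-' prefix for negatives
-- (exact hand port; fuel m+1 bounds the digit count of m)
def pvHexDigit (n : Nat) : Char := if n < 10 then Char.ofNat (48 + n) else Char.ofNat (87 + n)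

def pvHexAux : Nat → Nat → List Char
  | 0, _ => []
  | f + 1, n => if n < 16 then [pvHexDigit n] else pvHexAux f (n / 16) ++ [pvHexDigit (n % 16)]

def pvHex (n : Int) : List Char :=
  if n < 0 then '-' :: pvHexAux ((-n).toNat + 1) (-n).toNat
  else pvHexAux (n.toNat + 1) n.toNat

-- A's 'for _ in range(4)' with its break: state (ret, i)
def pvA_words (d : List Int) : Nat → Nat → List Char → List Char × Nat
  | 0, i, ret => (ret, i)
  | n + 1, i, ret =>
    let ret := ret ++ ['0', 'x']
    let p := (List.range 16).foldl
      (fun (p : List Char × Nat) _ => (p.1 ++ pvHex (PySem.List.pyGetD d ((p.2 : Nat) : Int) 0), p.2 + 1))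
      (ret, i)
    let ret := p.1 ++ [',', ' ']
    if d.length ≤ p.2 then (ret, p.2) else pvA_words d n p.2 ret

-- A's 'while i < len(d)' loop; fuel d.length is a bound on the iteration count (each
-- iteration advances i by at least 16)
def pvA_outer (d : List Int) : Nat → Nat → List Char → List Char
  | 0, _, ret => ret
  | f + 1, i, ret =>
    if i < d.length then
      let p := pvA_words d 4 i (ret ++ ("    ").toList)
      pvA_outer d f p.2 (p.1 ++ ['\n'])
    else ret

def indexes_to_c (d : List Int) (array_name : Option String) (comment : Option String) : String :=
  let ret : List Char := []
  let ret := match array_name with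
    | none => ret
    | some s => ret ++ ("__attribute__((aligned(16))) u64 ").toList ++ s.toList ++ ("[] = {\n").toList
  let ret := match comment with
    | none => ret
    | some s => ret ++ ("    // ").toList ++ s.toList ++ ['\n']
  let ret := pvA_outer d d.length 0 ret
  let ret := match array_name with
    | none => ret
    | some _ => ret ++ ['}', ';', '\n']
  String.mk ret

-- ===== PORT B =====

-- '0x' + ''.join(format(x, 'x') for x in block)
def pvB_word (b : List Int) : List Char := '0' :: 'x' :: b.flatMap pvHex

-- [word(d[k:k+16]) for k in range(0, len(d), 16)]
def pvB_words (d : List Int) : List (List Char) :=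
  if h : d = [] then []
  else pvB_word (d.take 16) :: pvB_words (d.drop 16)
termination_by d.length
decreasing_by simp [List.length_drop]; have := List.length_pos_of_ne_nil h; omega

-- ['    ' + ''.join(w + ', ' for w in words[j:j+4]) + '\n' for j in range(0, len(words), 4)]
def pvB_lines (ws : List (List Char)) : List (List Char) :=
  if h : ws = [] then []
  else (("    ").toList ++ (ws.take 4).flatMap (fun w => w ++ [',', ' ']) ++ ['\n']) :: pvB_lines (ws.drop 4)
termination_by ws.length
decreasing_by simp [List.length_drop]; have := List.length_pos_of_ne_nil h; omega

def indexes_to_c_alt (d : List Int) (array_name : Option String) (comment : Option String) : String :=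
  let header : List (List Char) := match array_name with
    | none => []
    | some s => [("__attribute__((aligned(16))) u64 ").toList ++ s.toList ++ ("[] = {\n").toList]
  let com : List (List Char) := match comment with
    | none => []
    | some s => [("    // ").toList ++ s.toList ++ ['\n']]
  let footer : List (List Char) := match array_name with
    | none => []
    | some _ => [['}', ';', '\n']]
  String.mk ((header ++ com ++ pvB_lines (pvB_words d) ++ footer).flatMap id)

-- ===== PRECONDITION & SPEC =====
-- Pre_: A's own 'assert (len(d) & 15) == 0' raises AssertionError otherwise.
def Pre_indexes_to_c (d : List Int) (array_name : Option String) (comment : Option String) : Prop :=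
  d.length % 16 = 0
instance (d : List Int) (array_name : Option String) (comment : Option String) : Decidable (Pre_indexes_to_c d array_name comment) := by unfold Pre_indexes_to_c; infer_instance

def pvWitness_indexes_to_c : List Int × Option String × Option String :=
  ([0, 1, 2, 3, 4, 5, 6, 7, 8, 9, 10, 11, 12, 13, 14, 15], some "arr", some "file.png")

def Spec_indexes_to_c (d : List Int) (array_name : Option String) (comment : Option String) (out : String) : Prop := out = indexes_to_c_alt d array_name comment
instance (d : List Int) (array_name : Option String) (comment : Option String) (out : String) : Decidable (Spec_indexes_to_c d array_name comment out) := by unfold Spec_indexes_to_c; infer_instance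

-- ===== CLAIM (what is proved, stated in full; the proofs are below) =====
def Claim_equal_indexes_to_c : Prop := ∀ (d : List Int) (array_name : Option String) (comment : Option String), Dom_indexes_to_c d array_name comment → Pre_indexes_to_c d array_name comment → Spec_indexes_to_c d array_name comment (indexes_to_c d array_name comment)

-- ===== LEMMAS AND PROOFS =====

theorem pv_innerFold (d : List Int) (n i : Nat) (h : i + n ≤ d.length) (ret : List Char) :
    (List.range n).foldl
      (fun (p : List Char × Nat) _ => (p.1 ++ pvHex (PySem.List.pyGetD d ((p.2 : Nat) : Int) 0), p.2 + 1))
      (ret, i)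
    = (ret ++ ((d.drop i).take n).flatMap pvHex, i + n) := by
  induction n with
  | zero => simp
  | succ n ih =>
    rw [List.range_succ, List.foldl_append, ih (by omega)]
    have hb : i + n < d.length := by omega
    have hget : PySem.List.pyGetD d (((i + n : Nat)) : Int) 0 = d[i + n] := by
      rw [PySem.List.pyGetD_natCast]
      exact List.getD_eq_getElem d 0 hb
    have htake : (d.drop i).take (n + 1) = (d.drop i).take n ++ [d[i + n]] := by
      rw [List.take_add_one]
      have : (d.drop i)[n]? = some d[i + n] := by
        rw [List.getElem?_drop]
        exact List.getElem?_eq_getElem (by omega)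
      simp [this]
    simp only [List.foldl_cons, List.foldl_nil, htake, List.flatMap_append, hget]
    simp [Nat.add_assoc]

theorem pvB_words_unfold (s : List Int) (h : s ≠ []) :
    pvB_words s = pvB_word (s.take 16) :: pvB_words (s.drop 16) := by
  rw [pvB_words.eq_def]; simp [h]

theorem pvB_words_nil : pvB_words [] = [] := by rw [pvB_words.eq_def]; simp

theorem pvB_words_drop_one (s : List Int) :
    (pvB_words s).drop 1 = pvB_words (s.drop 16) := by
  by_cases h : s = []
  · subst h; simp [pvB_words_nil]
  · rw [pvB_words_unfold s h]; simp

theorem pvB_words_drop_four (s : List Int) :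
    (pvB_words s).drop 4 = pvB_words (s.drop 64) := by
  have hsplit : (pvB_words s).drop 4 = ((((pvB_words s).drop 1).drop 1).drop 1).drop 1 := by
    simp [List.drop_drop]
  rw [hsplit, pvB_words_drop_one, pvB_words_drop_one, pvB_words_drop_one, pvB_words_drop_one]
  congr 1
  simp [List.drop_drop]

theorem pvB_lines_unfold (ws : List (List Char)) (h : ws ≠ []) :
    pvB_lines ws = (("    ").toList ++ (ws.take 4).flatMap (fun w => w ++ [',', ' ']) ++ ['\n']) :: pvB_lines (ws.drop 4) := by
  rw [pvB_lines.eq_def]; simp [h]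

theorem pvB_lines_nil : pvB_lines [] = [] := by rw [pvB_lines.eq_def]; simp

-- the up-to-4-word line step of A equals the take-4 chunk of B's word list
theorem pv_wordsN (n : Nat) (d : List Int) : ∀ (i : Nat) (ret : List Char),
    16 ∣ (d.length - i) → i < d.length →
    pvA_words d (n + 1) i ret
      = (ret ++ ((pvB_words (d.drop i)).take (n + 1)).flatMap (fun w => w ++ [',', ' ']),
         i + min (16 * (n + 1)) (d.length - i)) := by
  induction n with
  | zero =>
    intro i ret hdvd hlt
    have h16 : i + 16 ≤ d.length := by
      rcases hdvd with ⟨k, hk⟩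
      have : k ≠ 0 := by rintro rfl; omega
      omega
    have hs : d.drop i ≠ [] := by
      intro h; have := congrArg List.length h; simp at this; omega
    have hmin : min (16 * (0 + 1)) (d.length - i) = 16 := by omega
    rw [pvA_words]
    simp only [pv_innerFold d 16 i h16 (ret ++ ['0', 'x'])]
    rw [pvB_words_unfold _ hs, hmin]
    split_ifs with hend
    · simp [pvB_word]
    · rw [pvA_words]
      simp [pvB_word]
  | succ n ih =>
    intro i ret hdvd hlt
    have h16 : i + 16 ≤ d.length := by
      rcases hdvd with ⟨k, hk⟩
      have : k ≠ 0 := by rintro rfl; omega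
      omega
    have hs : d.drop i ≠ [] := by
      intro h; have := congrArg List.length h; simp at this; omega
    rw [pvA_words]
    simp only [pv_innerFold d 16 i h16 (ret ++ ['0', 'x'])]
    rw [pvB_words_unfold _ hs]
    by_cases hend : d.length ≤ i + 16
    · have hr : d.length - i = 16 := by
        rcases hdvd with ⟨k, hk⟩; omega
      have hsd : (d.drop i).drop 16 = [] := by
        rw [List.drop_drop]; apply List.drop_eq_nil_of_le; omega
      rw [if_pos hend, hsd, pvB_words_nil]
      simp [pvB_word, hr]
    · have hrec := ih (i + 16)
        (ret ++ ['0', 'x'] ++ ((d.drop i).take 16).flatMap pvHex ++ [',', ' '])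
        (by rcases hdvd with ⟨k, hk⟩; exact ⟨k - 1, by omega⟩) (by omega)
      rw [if_neg hend, hrec]
      simp only [Prod.mk.injEq]
      refine ⟨?_, ?_⟩
      · have hdd : d.drop (i + 16) = (d.drop i).drop 16 := by
          rw [List.drop_drop]
        rw [hdd]
        simp [pvB_word]
      · rcases hdvd with ⟨k, hk⟩
        omega

theorem pv_outer (d : List Int) : ∀ (fuel i : Nat) (ret : List Char),
    16 ∣ (d.length - i) → d.length - i ≤ 16 * fuel →
    pvA_outer d fuel i ret = ret ++ (pvB_lines (pvB_words (d.drop i))).flatMap id := by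
  intro fuel
  induction fuel with
  | zero =>
    intro i ret _ hle
    have : d.drop i = [] := List.drop_eq_nil_of_le (by omega)
    rw [this, pvB_words_nil, pvB_lines_nil]
    simp [pvA_outer]
  | succ f ih =>
    intro i ret hdvd hle
    rw [pvA_outer]
    by_cases hlt : i < d.length
    · simp only [if_pos hlt]
      rw [pv_wordsN 3 d i (ret ++ ("    ").toList) hdvd hlt]
      have hws : pvB_words (d.drop i) ≠ [] := by
        rw [pvB_words_unfold]
        · simp
        · intro h; have := congrArg List.length h; simp at this; omega
      rw [ih (i + min (16 * (3 + 1)) (d.length - i))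
          (ret ++ ("    ").toList ++ ((pvB_words (d.drop i)).take (3 + 1)).flatMap (fun w => w ++ [',', ' ']) ++ ['\n'])
          (by rcases hdvd with ⟨k, hk⟩
              rcases Nat.lt_or_ge (d.length - i) 64 with h | h
              · exact ⟨0, by omega⟩
              · exact ⟨k - 4, by omega⟩)
          (by rcases hdvd with ⟨k, hk⟩; omega)]
      rw [pvB_lines_unfold _ hws]
      have hdrop : pvB_words (d.drop (i + min (16 * (3 + 1)) (d.length - i))) = (pvB_words (d.drop i)).drop 4 := by
        rw [pvB_words_drop_four, List.drop_drop]
        rcases Nat.lt_or_ge (d.length - i) 64 with h | h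
        · have h1 : d.drop (i + min (16 * (3 + 1)) (d.length - i)) = [] := List.drop_eq_nil_of_le (by omega)
          have h2 : (d.drop i).drop 64 = [] := by
            rw [List.drop_drop]; exact List.drop_eq_nil_of_le (by omega)
          rw [List.drop_drop] at h2
          rw [h1, h2, pvB_words_nil]
        · have heq : i + min (16 * (3 + 1)) (d.length - i) = i + 64 := by omega
          rw [heq]
      rw [hdrop]
      simp
    · simp only [if_neg hlt]
      have : d.drop i = [] := List.drop_eq_nil_of_le (by omega)
      rw [this, pvB_words_nil, pvB_lines_nil]
      simp

-- ===== VERDICT (by name: the statement is the Claim_ definition above) =====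
theorem indexes_to_c_spec : Claim_equal_indexes_to_c := by
  intro d an c _ hpre
  unfold Spec_indexes_to_c indexes_to_c indexes_to_c_alt
  have hdvd : 16 ∣ d.length := Nat.dvd_of_mod_eq_zero hpre
  have hmain := pv_outer d d.length 0
  simp only [List.drop_zero, Nat.sub_zero] at hmain
  cases an <;> cases c <;>
    simp [hmain _ hdvd (by omega), List.flatMap_append]
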